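-- pv_equiv track=rewrite | github.com/Lazarus9000/aoc2023 | 7.py | xofakind
-- ===== SOURCE A (Python) =====
-- def xofakind(hand, count):
--     countsum = []
--     countresult = False
--
--     for i in range(len(hand)):
--         countsum.append(0)
--         for card in hand:
--             if hand[i] == card:
--                 countsum[i] += 1
--
--     for card in countsum:
--         if card == count:
--             countresult = True
--
--     return countresult
-- ===== SOURCE B (Python) =====
-- def xofakind(hand, count):
--     counts = {}
--     for card in hand:
--         counts[card] = counts.get(card, 0) + 1
--     return any(v == count for v in counts.values())
-- ===== Notes on version B (the rewrite author's own statement) =====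
-- stated objective: faster
-- what changed: Replaces the O(n^2) nested per-position counting (plus a final scan) with a single pass building a frequency dictionary, then checks the distinct counts directly.
import Mathlib
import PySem

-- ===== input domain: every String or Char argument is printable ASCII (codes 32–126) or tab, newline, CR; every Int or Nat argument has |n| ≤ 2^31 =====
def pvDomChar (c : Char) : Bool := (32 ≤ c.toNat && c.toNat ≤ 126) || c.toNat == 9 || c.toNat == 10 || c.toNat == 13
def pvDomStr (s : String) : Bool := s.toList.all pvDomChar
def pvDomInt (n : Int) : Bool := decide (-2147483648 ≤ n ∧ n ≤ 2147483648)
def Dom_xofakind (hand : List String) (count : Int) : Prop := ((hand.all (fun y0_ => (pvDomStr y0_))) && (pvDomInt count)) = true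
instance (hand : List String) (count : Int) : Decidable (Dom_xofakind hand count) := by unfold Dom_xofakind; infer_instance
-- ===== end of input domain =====

-- B replaces A's quadratic per-position counting by a one-pass frequency dictionary (objective: faster).

-- ===== PORT A =====
def xofakind (hand : List String) (count : Int) : Bool :=
  -- for i in range(len(hand)): countsum.append(0); for card in hand: if hand[i]==card: countsum[i]+=1
  -- (the append-0-then-increment of slot i is transcribed as appending the inner loop's accumulated sum)
  let countsum : List Int :=
    (PySem.List.pyRange 0 hand.length 1).foldl
      (fun cs i =>
        cs ++ [hand.foldl
          (fun c card => if PySem.List.pyGetD hand i "" == card then c + 1 else c) 0])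
      []
  let countresult :=
    countsum.foldl (fun r card => if card == count then true else r) false
  countresult

-- ===== PORT B =====
def xofakind_alt (hand : List String) (count : Int) : Bool :=
  let counts : PySem.Dict String Int :=
    hand.foldl (fun d card => d.insert card (d.getD card 0 + 1)) PySem.Dict.empty
  counts.values.any (fun v => v == count)

-- ===== PRECONDITION & SPEC =====
def Spec_xofakind (hand : List String) (count : Int) (out : Bool) : Prop := out = xofakind_alt hand count
instance (hand : List String) (count : Int) (out : Bool) : Decidable (Spec_xofakind hand count out) := by unfold Spec_xofakind; infer_instance

-- ===== CLAIM (what is proved, stated in full; the proofs are below) =====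
def Claim_equal_xofakind : Prop := ∀ (hand : List String) (count : Int), Dom_xofakind hand count → Spec_xofakind hand count (xofakind hand count)

-- ===== LEMMAS AND PROOFS =====

-- A's final sticky-flag scan is 'count occurs in the list'
theorem foldl_flag_eq_any (l : List Int) (count : Int) (b : Bool) :
    l.foldl (fun r card => if card == count then true else r) b = (b || l.any (fun v => v == count)) := by
  induction l generalizing b with
  | nil => simp
  | cons x xs ih =>
    simp only [List.foldl_cons, List.any_cons, ih]
    by_cases h : x = count
    · simp [h]
    · have hx : (x == count) = false := beq_eq_false_iff_ne.mpr h
      simp [hx]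

theorem xofakind_eq_any (hand : List String) (count : Int) :
    xofakind hand count = hand.any (fun x => (hand.count x : Int) == count) := by
  unfold xofakind
  dsimp only
  rw [PySem.List.foldl_append_singleton_eq_map, foldl_flag_eq_any]
  simp only [List.nil_append, Bool.false_or, List.any_map, Function.comp_def]
  have hmap : (PySem.List.pyRange 0 hand.length 1).map (fun i => PySem.List.pyGetD hand i "") = hand := by
    simpa using PySem.List.map_pyGetD_pyRange_zero hand ""
  have := congrArg (List.any · (fun x => (hand.foldl (fun c card => if x == card then c + 1 else c) 0 : Int) == count)) hmap
  simp only [List.any_map, Function.comp_def] at this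
  rw [this]
  congr 1
  funext x
  congr 1
  rw [PySem.List.foldl_count_if]
  rw [zero_add]
  congr 1
  apply List.countP_congr
  intro a _
  simp only [beq_iff_eq]
  exact eq_comm

theorem xofakind_alt_eq_any (hand : List String) (count : Int) :
    xofakind_alt hand count = (PySem.Set.ofList hand).any (fun x => (hand.count x : Int) == count) := by
  unfold xofakind_alt
  dsimp only
  rw [PySem.Dict.foldl_insert_getD_add_one_eq_counter]
  rw [PySem.Dict.values_eq_map_keys _ (PySem.Dict.nodup_keys_counter hand) 0]
  simp only [List.any_map, Function.comp_def, PySem.Dict.keys_counter]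
  congr 1
  funext x
  rw [PySem.Dict.getD_counter]

-- ===== VERDICT (by name: the statement is the Claim_ definition above) =====
theorem xofakind_spec : Claim_equal_xofakind := by
  intro hand count _
  unfold Spec_xofakind
  rw [xofakind_eq_any, xofakind_alt_eq_any]
  apply Bool.eq_iff_iff.mpr
  simp only [List.any_eq_true, PySem.Set.mem_ofList]
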